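-- pv_equiv track=rewrite | github.com/markod0925/WLD | src/worklog_diary/core/activity_extraction.py | _strip_conversation_suffix
-- ===== SOURCE A (Python) =====
-- def _strip_conversation_suffix(title: str) -> str:
--     suffixes = (
--         " - Microsoft Teams",
--         " | Microsoft Teams",
--         " - Teams",
--         " - Slack",
--         " | Slack",
--         " - Zoom",
--         " | Zoom",
--         " - Webex",
--         " | Webex",
--         " - Google Meet",
--         " | Google Meet",
--     )
--     stripped = title.strip()
--     for suffix in suffixes:
--         if stripped.endswith(suffix):
--             return stripped[: -len(suffix)].strip()
--     return stripped
-- ===== SOURCE B (Python) =====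
-- def _strip_conversation_suffix(title: str) -> str:
--     apps = {"Microsoft Teams", "Slack", "Zoom", "Webex", "Google Meet"}
--     stripped = title.strip()
--     for sep, names in ((" | ", apps), (" - ", apps | {"Teams"})):
--         i = stripped.rfind(sep)
--         if i >= 0 and stripped[i + 3:] in names:
--             return stripped[:i].strip()
--     return stripped
-- ===== Notes on version B (the rewrite author's own statement) =====
-- stated objective: simpler
-- what changed: Instead of scanning the 11 concatenated separator+app suffix strings with endswith, B splits the stripped title at the last occurrence of each of the two separators (rfind) and does one set-membership lookup of the tail against the app-name set; correct because no app name contains a separator, so the tail after the last separator equals an app name exactly when the title ends with separator+app.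
import Mathlib
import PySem

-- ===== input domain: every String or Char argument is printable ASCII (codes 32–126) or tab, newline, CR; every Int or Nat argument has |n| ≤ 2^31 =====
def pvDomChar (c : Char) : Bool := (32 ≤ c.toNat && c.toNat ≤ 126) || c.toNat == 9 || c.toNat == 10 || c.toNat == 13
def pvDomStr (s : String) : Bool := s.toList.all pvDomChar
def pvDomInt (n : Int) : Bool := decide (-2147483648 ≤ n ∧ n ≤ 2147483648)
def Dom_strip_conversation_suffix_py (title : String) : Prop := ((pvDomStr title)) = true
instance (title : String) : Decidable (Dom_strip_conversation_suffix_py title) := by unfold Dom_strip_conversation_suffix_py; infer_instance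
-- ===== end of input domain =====

-- B replaces A's eleven endswith tests by, for each of the two separators, one rfind of the
-- separator's last occurrence plus one set lookup of the tail against the app-name set
-- (objective: simpler — rpartition-style split instead of a scan over 11 concatenated suffixes).

-- ===== PORT A =====
def pvASuffixes : List String :=
  [" - Microsoft Teams", " | Microsoft Teams", " - Teams", " - Slack", " | Slack", " - Zoom", " | Zoom", " - Webex", " | Webex", " - Google Meet", " | Google Meet"]

def pvALoop (stripped : String) : List String → String
  | [] => stripped
  | suf :: rest =>
    if PySem.Str.endswith stripped suf then
      PySem.Str.strip (PySem.Str.slice stripped none (some (-(PySem.Str.len suf : Int))))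
    else pvALoop stripped rest

def strip_conversation_suffix_py (title : String) : String :=
  pvALoop (PySem.Str.strip title) pvASuffixes

-- ===== PORT B =====
def pvApps : PySem.Set String :=
  PySem.Set.ofList ["Microsoft Teams", "Slack", "Zoom", "Webex", "Google Meet"]

-- Python's `apps | {"Teams"}`
def pvDashNames : PySem.Set String :=
  PySem.Set.ofList ["Microsoft Teams", "Slack", "Zoom", "Webex", "Google Meet", "Teams"]

-- one iteration of B's loop: i = stripped.rfind(sep); if i >= 0 and stripped[i+3:] in names: return stripped[:i].strip()
def pvTrySep (stripped sep : String) (names : PySem.Set String) : Option String :=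
  let i := PySem.Str.rfind stripped sep
  if 0 ≤ i ∧ PySem.Set.contains names (PySem.Str.slice stripped (some (i + 3)) none) = true then
    some (PySem.Str.strip (PySem.Str.slice stripped none (some i)))
  else none

def strip_conversation_suffix_py_alt (title : String) : String :=
  let stripped := PySem.Str.strip title
  match pvTrySep stripped " | " pvApps with
  | some r => r
  | none =>
    match pvTrySep stripped " - " pvDashNames with
    | some r => r
    | none => stripped

-- ===== PRECONDITION & SPEC =====
def Spec_strip_conversation_suffix_py (title : String) (out : String) : Prop := out = strip_conversation_suffix_py_alt title
instance (title : String) (out : String) : Decidable (Spec_strip_conversation_suffix_py title out) := by unfold Spec_strip_conversation_suffix_py; infer_instance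

-- ===== CLAIM (what is proved, stated in full; the proofs are below) =====
def Claim_equal_strip_conversation_suffix_py : Prop := ∀ (title : String), Dom_strip_conversation_suffix_py title → Spec_strip_conversation_suffix_py title (strip_conversation_suffix_py title)

-- ===== LEMMAS AND PROOFS =====

lemma pvTrySep_def (stripped sep : String) (names : PySem.Set String) :
    pvTrySep stripped sep names =
      if 0 ≤ PySem.Str.rfind stripped sep ∧
         PySem.Set.contains names (PySem.Str.slice stripped (some (PySem.Str.rfind stripped sep + 3)) none) = true then
        some (PySem.Str.strip (PySem.Str.slice stripped none (some (PySem.Str.rfind stripped sep))))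
      else none := rfl

lemma pv_go_zero (s sub : List Char) :
    PySem.Chars.rfind.go s sub 0 = if sub.isPrefixOf s then 0 else -1 := rfl

lemma pv_go_succ (s sub : List Char) (j : Nat) :
    PySem.Chars.rfind.go s sub (j + 1) =
      if sub.isPrefixOf (s.drop (j + 1)) then ((j + 1 : Nat) : Int) else PySem.Chars.rfind.go s sub j := rfl

lemma pv_go_eq (s sub : List Char) (m : Nat) (k : Nat) (hmk : m ≤ k)
    (hp : sub.isPrefixOf (s.drop m) = true)
    (hno : ∀ i, m < i → i ≤ k → sub.isPrefixOf (s.drop i) = false) :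
    PySem.Chars.rfind.go s sub k = (m : Int) := by
  induction k with
  | zero =>
    have hm0 : m = 0 := by omega
    subst hm0
    rw [pv_go_zero]
    simp only [List.drop_zero] at hp
    simp [hp]
  | succ j ih =>
    rw [pv_go_succ]
    by_cases hm : m = j + 1
    · subst hm
      rw [hp]
      simp
    · have hmj : m ≤ j := by omega
      rw [hno (j + 1) (by omega) (by omega)]
      simp only [Bool.false_eq_true, if_false]
      exact ih hmj (fun i h1 h2 => hno i h1 (by omega))

lemma pv_go_prefix (s sub : List Char) (k : Nat) (h : 0 ≤ PySem.Chars.rfind.go s sub k) :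
    sub.isPrefixOf (s.drop (PySem.Chars.rfind.go s sub k).toNat) = true ∧
      (PySem.Chars.rfind.go s sub k).toNat ≤ k := by
  induction k with
  | zero =>
    rw [pv_go_zero] at h ⊢
    by_cases hp : sub.isPrefixOf s = true
    · simp only [hp, if_true]
      refine ⟨?_, le_refl 0⟩
      simpa using hp
    · simp only [Bool.not_eq_true] at hp
      simp [hp] at h
  | succ j ih =>
    rw [pv_go_succ] at h ⊢
    by_cases hp : sub.isPrefixOf (s.drop (j + 1)) = true
    · simp only [hp, if_true]
      refine ⟨?_, by simp⟩
      simpa using hp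
    · simp only [Bool.not_eq_true] at hp
      simp only [hp, Bool.false_eq_true, if_false] at h ⊢
      obtain ⟨h1, h2⟩ := ih h
      exact ⟨h1, by omega⟩

lemma pv_rfind_of_suffix (s u sep app : List Char)
    (hsplit : u = sep ++ app)
    (hnl : ∀ j, j ≤ u.length → 0 < j → sep.isPrefixOf (u.drop j) = false)
    (hu : u <:+ s) :
    PySem.Chars.rfind s sep = ((s.length - u.length : Nat) : Int) := by
  obtain ⟨t, ht⟩ := hu
  have hlen : s.length = t.length + u.length := by rw [← ht]; simp
  unfold PySem.Chars.rfind
  apply pv_go_eq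
  · omega
  · rw [show s.length - u.length = t.length from by omega, ← ht, List.drop_left, hsplit]
    simp [List.isPrefixOf_iff_prefix]
  · intro i h1 h2
    have hd : List.drop i s = u.drop (i - t.length) := by
      rw [← ht, List.drop_append]
      rw [List.drop_eq_nil_of_le (by omega : t.length ≤ i), List.nil_append]
    rw [hd]
    exact hnl _ (by omega) (by omega)

lemma pv_tail_of_suffix (s u sep app : List Char)
    (hsplit : u = sep ++ app) (hsep3 : sep.length = 3) (hu : u <:+ s) :
    s.drop (s.length - u.length + 3) = app := by
  obtain ⟨t, ht⟩ := hu
  have hlen : s.length = t.length + u.length := by rw [← ht]; simp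
  rw [show s.length - u.length + 3 = t.length + 3 from by omega, ← ht, List.drop_append]
  rw [List.drop_eq_nil_of_le (by omega : t.length ≤ t.length + 3), List.nil_append,
    show t.length + 3 - t.length = 3 from by omega, hsplit, ← hsep3, List.drop_left]

lemma pv_guard_suffix (s sep : List Char) (hsep3 : sep.length = 3) (k : Nat)
    (hp : sep.isPrefixOf (s.drop k) = true) :
    sep ++ s.drop (k + 3) <:+ s := by
  have hpre : sep <+: s.drop k := List.isPrefixOf_iff_prefix.mp hp
  obtain ⟨r, hr⟩ := hpre
  have h1 : (sep ++ r).drop sep.length = r := by rw [List.drop_left]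
  rw [hr, hsep3, List.drop_drop] at h1
  have hsk : s.drop k = sep ++ s.drop (k + 3) := by rw [h1, hr]
  rw [← hsk]
  exact List.drop_suffix k s

lemma pv_no_two (s u v : List Char) (hu : u <:+ s) (hv : v <:+ s)
    (h1 : ¬ u <:+ v) (h2 : ¬ v <:+ u) : False := by
  rcases le_total u.length v.length with h | h
  · exact h1 (List.suffix_of_suffix_length_le hu hv h)
  · exact h2 (List.suffix_of_suffix_length_le hv hu h)

lemma pv_endswith_true_iff (s u : String) :
    (PySem.Str.endswith s u = true) ↔ u.toList <:+ s.toList := by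
  simp [PySem.Chars.endswith_iff]

lemma pv_head_slice (s : String) (n : Nat) (hn : 0 < n) :
    PySem.Str.slice s none (some ((s.toList.length - n : Nat) : Int)) =
      PySem.Str.slice s none (some (-(n : Int))) := by
  apply String.toList_inj.mp
  simp [PySem.Str.toList_slice, PySem.Chars.slice_eq_listSlice, PySem.List.slice_to_natCast,
    PySem.List.slice_to_neg_natCast _ _ hn]

lemma pv_rfind_nonneg (s sep : String) (h : 0 ≤ PySem.Str.rfind s sep) :
    sep.toList.isPrefixOf (s.toList.drop (PySem.Str.rfind s sep).toNat) = true ∧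
      (PySem.Str.rfind s sep).toNat ≤ s.toList.length := by
  rw [PySem.Str.rfind_eq] at h ⊢
  unfold PySem.Chars.rfind at h ⊢
  exact pv_go_prefix _ _ _ h

lemma pvTry_hit (s u sep app : String) (names : PySem.Set String) (n : Nat)
    (hsplit : u.toList = sep.toList ++ app.toList)
    (hsep3 : sep.toList.length = 3)
    (hlen : u.toList.length = n) (hn : 0 < n)
    (hnl : ∀ j, j ≤ u.toList.length → 0 < j → sep.toList.isPrefixOf (u.toList.drop j) = false)
    (hmem : PySem.Set.contains names app = true)
    (hu : u.toList <:+ s.toList) :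
    pvTrySep s sep names =
      some (PySem.Str.strip (PySem.Str.slice s none (some (-(n : Int))))) := by
  have hrf : PySem.Str.rfind s sep = ((s.toList.length - n : Nat) : Int) := by
    rw [PySem.Str.rfind_eq, ← hlen]
    exact pv_rfind_of_suffix _ _ _ _ hsplit hnl hu
  have htail : PySem.Str.slice s (some (((s.toList.length - n : Nat) : Int) + 3)) none = app := by
    apply String.toList_inj.mp
    rw [show (((s.toList.length - n : Nat) : Int) + 3) = ((s.toList.length - n + 3 : Nat) : Int) from by push_cast; ring,
      PySem.Str.toList_slice, PySem.Chars.slice_eq_listSlice, PySem.List.slice_from_natCast, ← hlen]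
    exact pv_tail_of_suffix _ _ _ _ hsplit hsep3 hu
  rw [pvTrySep_def, hrf, htail, hmem]
  rw [if_pos ⟨Int.natCast_nonneg _, rfl⟩, pv_head_slice s n hn]

lemma pvTry_miss (s sep : String) (names : PySem.Set String) (hsep3 : sep.toList.length = 3)
    (hno : ∀ a : String, PySem.Set.contains names a = true →
      ¬ ((sep.toList ++ a.toList) <:+ s.toList)) :
    pvTrySep s sep names = none := by
  rw [pvTrySep_def]
  split_ifs with h
  · exfalso
    obtain ⟨h0, hc⟩ := h
    have hcast : PySem.Str.rfind s sep + 3 = (((PySem.Str.rfind s sep).toNat + 3 : Nat) : Int) := by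
      omega
    obtain ⟨hpre, _⟩ := pv_rfind_nonneg s sep h0
    have hts : (PySem.Str.slice s (some (PySem.Str.rfind s sep + 3)) none).toList =
        s.toList.drop ((PySem.Str.rfind s sep).toNat + 3) := by
      rw [hcast, PySem.Str.toList_slice, PySem.Chars.slice_eq_listSlice, PySem.List.slice_from_natCast]
    apply hno _ hc
    rw [hts]
    exact pv_guard_suffix _ _ hsep3 _ hpre
  · rfl

lemma pv_mem_apps (a : String) (h : PySem.Set.contains pvApps a = true) :
    a ∈ (["Microsoft Teams", "Slack", "Zoom", "Webex", "Google Meet"] : List String) := by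
  rw [show pvApps = (["Microsoft Teams", "Slack", "Zoom", "Webex", "Google Meet"] : List String) from by decide] at h
  simpa [PySem.Set.contains] using h

lemma pv_mem_dashNames (a : String) (h : PySem.Set.contains pvDashNames a = true) :
    a ∈ (["Microsoft Teams", "Slack", "Zoom", "Webex", "Google Meet", "Teams"] : List String) := by
  rw [show pvDashNames = (["Microsoft Teams", "Slack", "Zoom", "Webex", "Google Meet", "Teams"] : List String) from by decide] at h
  simpa [PySem.Set.contains] using h


lemma pv_key (s : String) :
    pvALoop s pvASuffixes =
      (match pvTrySep s " | " pvApps with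
       | some r => r
       | none =>
         match pvTrySep s " - " pvDashNames with
         | some r => r
         | none => s) := by
  by_cases h1 : PySem.Str.endswith s " - Microsoft Teams" = true
  · -- matched suffix ' - Microsoft Teams'
    have hu : (" - Microsoft Teams" : String).toList <:+ s.toList := (pv_endswith_true_iff s _).mp h1
    have hb1 : pvTrySep s " | " pvApps = none := by
      apply pvTry_miss s " | " pvApps (by decide)
      intro a hc hsuf
      have ham := pv_mem_apps a hc
      fin_cases ham <;>
        exact pv_no_two s.toList _ _ hu hsuf (by decide) (by decide)
    have hb2 : pvTrySep s " - " pvDashNames = some (PySem.Str.strip (PySem.Str.slice s none (some (-(18 : Int))))) :=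
      pvTry_hit s " - Microsoft Teams" " - " "Microsoft Teams" pvDashNames 18 (by decide) (by decide) (by decide) (by decide) (by decide) (by decide) hu
    simp only [pvASuffixes, pvALoop]
    rw [if_pos h1, hb1, hb2]
    rfl
  by_cases h2 : PySem.Str.endswith s " | Microsoft Teams" = true
  · -- matched suffix ' | Microsoft Teams'
    have hu : (" | Microsoft Teams" : String).toList <:+ s.toList := (pv_endswith_true_iff s _).mp h2
    have hb1 : pvTrySep s " | " pvApps = some (PySem.Str.strip (PySem.Str.slice s none (some (-(18 : Int))))) :=
      pvTry_hit s " | Microsoft Teams" " | " "Microsoft Teams" pvApps 18 (by decide) (by decide) (by decide) (by decide) (by decide) (by decide) hu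
    simp only [pvASuffixes, pvALoop]
    rw [if_neg h1, if_pos h2, hb1]
    rfl
  by_cases h3 : PySem.Str.endswith s " - Teams" = true
  · -- matched suffix ' - Teams'
    have hu : (" - Teams" : String).toList <:+ s.toList := (pv_endswith_true_iff s _).mp h3
    have hb1 : pvTrySep s " | " pvApps = none := by
      apply pvTry_miss s " | " pvApps (by decide)
      intro a hc hsuf
      have ham := pv_mem_apps a hc
      fin_cases ham <;>
        exact pv_no_two s.toList _ _ hu hsuf (by decide) (by decide)
    have hb2 : pvTrySep s " - " pvDashNames = some (PySem.Str.strip (PySem.Str.slice s none (some (-(8 : Int))))) :=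
      pvTry_hit s " - Teams" " - " "Teams" pvDashNames 8 (by decide) (by decide) (by decide) (by decide) (by decide) (by decide) hu
    simp only [pvASuffixes, pvALoop]
    rw [if_neg h1, if_neg h2, if_pos h3, hb1, hb2]
    rfl
  by_cases h4 : PySem.Str.endswith s " - Slack" = true
  · -- matched suffix ' - Slack'
    have hu : (" - Slack" : String).toList <:+ s.toList := (pv_endswith_true_iff s _).mp h4
    have hb1 : pvTrySep s " | " pvApps = none := by
      apply pvTry_miss s " | " pvApps (by decide)
      intro a hc hsuf
      have ham := pv_mem_apps a hc
      fin_cases ham <;>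
        exact pv_no_two s.toList _ _ hu hsuf (by decide) (by decide)
    have hb2 : pvTrySep s " - " pvDashNames = some (PySem.Str.strip (PySem.Str.slice s none (some (-(8 : Int))))) :=
      pvTry_hit s " - Slack" " - " "Slack" pvDashNames 8 (by decide) (by decide) (by decide) (by decide) (by decide) (by decide) hu
    simp only [pvASuffixes, pvALoop]
    rw [if_neg h1, if_neg h2, if_neg h3, if_pos h4, hb1, hb2]
    rfl
  by_cases h5 : PySem.Str.endswith s " | Slack" = true
  · -- matched suffix ' | Slack'
    have hu : (" | Slack" : String).toList <:+ s.toList := (pv_endswith_true_iff s _).mp h5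
    have hb1 : pvTrySep s " | " pvApps = some (PySem.Str.strip (PySem.Str.slice s none (some (-(8 : Int))))) :=
      pvTry_hit s " | Slack" " | " "Slack" pvApps 8 (by decide) (by decide) (by decide) (by decide) (by decide) (by decide) hu
    simp only [pvASuffixes, pvALoop]
    rw [if_neg h1, if_neg h2, if_neg h3, if_neg h4, if_pos h5, hb1]
    rfl
  by_cases h6 : PySem.Str.endswith s " - Zoom" = true
  · -- matched suffix ' - Zoom'
    have hu : (" - Zoom" : String).toList <:+ s.toList := (pv_endswith_true_iff s _).mp h6
    have hb1 : pvTrySep s " | " pvApps = none := by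
      apply pvTry_miss s " | " pvApps (by decide)
      intro a hc hsuf
      have ham := pv_mem_apps a hc
      fin_cases ham <;>
        exact pv_no_two s.toList _ _ hu hsuf (by decide) (by decide)
    have hb2 : pvTrySep s " - " pvDashNames = some (PySem.Str.strip (PySem.Str.slice s none (some (-(7 : Int))))) :=
      pvTry_hit s " - Zoom" " - " "Zoom" pvDashNames 7 (by decide) (by decide) (by decide) (by decide) (by decide) (by decide) hu
    simp only [pvASuffixes, pvALoop]
    rw [if_neg h1, if_neg h2, if_neg h3, if_neg h4, if_neg h5, if_pos h6, hb1, hb2]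
    rfl
  by_cases h7 : PySem.Str.endswith s " | Zoom" = true
  · -- matched suffix ' | Zoom'
    have hu : (" | Zoom" : String).toList <:+ s.toList := (pv_endswith_true_iff s _).mp h7
    have hb1 : pvTrySep s " | " pvApps = some (PySem.Str.strip (PySem.Str.slice s none (some (-(7 : Int))))) :=
      pvTry_hit s " | Zoom" " | " "Zoom" pvApps 7 (by decide) (by decide) (by decide) (by decide) (by decide) (by decide) hu
    simp only [pvASuffixes, pvALoop]
    rw [if_neg h1, if_neg h2, if_neg h3, if_neg h4, if_neg h5, if_neg h6, if_pos h7, hb1]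
    rfl
  by_cases h8 : PySem.Str.endswith s " - Webex" = true
  · -- matched suffix ' - Webex'
    have hu : (" - Webex" : String).toList <:+ s.toList := (pv_endswith_true_iff s _).mp h8
    have hb1 : pvTrySep s " | " pvApps = none := by
      apply pvTry_miss s " | " pvApps (by decide)
      intro a hc hsuf
      have ham := pv_mem_apps a hc
      fin_cases ham <;>
        exact pv_no_two s.toList _ _ hu hsuf (by decide) (by decide)
    have hb2 : pvTrySep s " - " pvDashNames = some (PySem.Str.strip (PySem.Str.slice s none (some (-(8 : Int))))) :=
      pvTry_hit s " - Webex" " - " "Webex" pvDashNames 8 (by decide) (by decide) (by decide) (by decide) (by decide) (by decide) hu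
    simp only [pvASuffixes, pvALoop]
    rw [if_neg h1, if_neg h2, if_neg h3, if_neg h4, if_neg h5, if_neg h6, if_neg h7, if_pos h8, hb1, hb2]
    rfl
  by_cases h9 : PySem.Str.endswith s " | Webex" = true
  · -- matched suffix ' | Webex'
    have hu : (" | Webex" : String).toList <:+ s.toList := (pv_endswith_true_iff s _).mp h9
    have hb1 : pvTrySep s " | " pvApps = some (PySem.Str.strip (PySem.Str.slice s none (some (-(8 : Int))))) :=
      pvTry_hit s " | Webex" " | " "Webex" pvApps 8 (by decide) (by decide) (by decide) (by decide) (by decide) (by decide) hu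
    simp only [pvASuffixes, pvALoop]
    rw [if_neg h1, if_neg h2, if_neg h3, if_neg h4, if_neg h5, if_neg h6, if_neg h7, if_neg h8, if_pos h9, hb1]
    rfl
  by_cases h10 : PySem.Str.endswith s " - Google Meet" = true
  · -- matched suffix ' - Google Meet'
    have hu : (" - Google Meet" : String).toList <:+ s.toList := (pv_endswith_true_iff s _).mp h10
    have hb1 : pvTrySep s " | " pvApps = none := by
      apply pvTry_miss s " | " pvApps (by decide)
      intro a hc hsuf
      have ham := pv_mem_apps a hc
      fin_cases ham <;>
        exact pv_no_two s.toList _ _ hu hsuf (by decide) (by decide)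
    have hb2 : pvTrySep s " - " pvDashNames = some (PySem.Str.strip (PySem.Str.slice s none (some (-(14 : Int))))) :=
      pvTry_hit s " - Google Meet" " - " "Google Meet" pvDashNames 14 (by decide) (by decide) (by decide) (by decide) (by decide) (by decide) hu
    simp only [pvASuffixes, pvALoop]
    rw [if_neg h1, if_neg h2, if_neg h3, if_neg h4, if_neg h5, if_neg h6, if_neg h7, if_neg h8, if_neg h9, if_pos h10, hb1, hb2]
    rfl
  by_cases h11 : PySem.Str.endswith s " | Google Meet" = true
  · -- matched suffix ' | Google Meet'
    have hu : (" | Google Meet" : String).toList <:+ s.toList := (pv_endswith_true_iff s _).mp h11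
    have hb1 : pvTrySep s " | " pvApps = some (PySem.Str.strip (PySem.Str.slice s none (some (-(14 : Int))))) :=
      pvTry_hit s " | Google Meet" " | " "Google Meet" pvApps 14 (by decide) (by decide) (by decide) (by decide) (by decide) (by decide) hu
    simp only [pvASuffixes, pvALoop]
    rw [if_neg h1, if_neg h2, if_neg h3, if_neg h4, if_neg h5, if_neg h6, if_neg h7, if_neg h8, if_neg h9, if_neg h10, if_pos h11, hb1]
    rfl
  · -- no suffix matches
    have hb1 : pvTrySep s " | " pvApps = none := by
      apply pvTry_miss s " | " pvApps (by decide)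
      intro a hc hsuf
      have ham := pv_mem_apps a hc
      fin_cases ham
      · exact h2 ((pv_endswith_true_iff s " | Microsoft Teams").mpr (by rw [show (" | Microsoft Teams" : String).toList = (" | " : String).toList ++ ("Microsoft Teams" : String).toList from by decide]; exact hsuf))
      · exact h5 ((pv_endswith_true_iff s " | Slack").mpr (by rw [show (" | Slack" : String).toList = (" | " : String).toList ++ ("Slack" : String).toList from by decide]; exact hsuf))
      · exact h7 ((pv_endswith_true_iff s " | Zoom").mpr (by rw [show (" | Zoom" : String).toList = (" | " : String).toList ++ ("Zoom" : String).toList from by decide]; exact hsuf))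
      · exact h9 ((pv_endswith_true_iff s " | Webex").mpr (by rw [show (" | Webex" : String).toList = (" | " : String).toList ++ ("Webex" : String).toList from by decide]; exact hsuf))
      · exact h11 ((pv_endswith_true_iff s " | Google Meet").mpr (by rw [show (" | Google Meet" : String).toList = (" | " : String).toList ++ ("Google Meet" : String).toList from by decide]; exact hsuf))
    have hb2 : pvTrySep s " - " pvDashNames = none := by
      apply pvTry_miss s " - " pvDashNames (by decide)
      intro a hc hsuf
      have ham := pv_mem_dashNames a hc
      fin_cases ham
      · exact h1 ((pv_endswith_true_iff s " - Microsoft Teams").mpr (by rw [show (" - Microsoft Teams" : String).toList = (" - " : String).toList ++ ("Microsoft Teams" : String).toList from by decide]; exact hsuf))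
      · exact h4 ((pv_endswith_true_iff s " - Slack").mpr (by rw [show (" - Slack" : String).toList = (" - " : String).toList ++ ("Slack" : String).toList from by decide]; exact hsuf))
      · exact h6 ((pv_endswith_true_iff s " - Zoom").mpr (by rw [show (" - Zoom" : String).toList = (" - " : String).toList ++ ("Zoom" : String).toList from by decide]; exact hsuf))
      · exact h8 ((pv_endswith_true_iff s " - Webex").mpr (by rw [show (" - Webex" : String).toList = (" - " : String).toList ++ ("Webex" : String).toList from by decide]; exact hsuf))
      · exact h10 ((pv_endswith_true_iff s " - Google Meet").mpr (by rw [show (" - Google Meet" : String).toList = (" - " : String).toList ++ ("Google Meet" : String).toList from by decide]; exact hsuf))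
      · exact h3 ((pv_endswith_true_iff s " - Teams").mpr (by rw [show (" - Teams" : String).toList = (" - " : String).toList ++ ("Teams" : String).toList from by decide]; exact hsuf))
    simp only [pvASuffixes, pvALoop]
    rw [if_neg h1, if_neg h2, if_neg h3, if_neg h4, if_neg h5, if_neg h6, if_neg h7, if_neg h8, if_neg h9, if_neg h10, if_neg h11, hb1, hb2]

-- ===== VERDICT (by name: the statement is the Claim_ definition above) =====
theorem strip_conversation_suffix_py_spec : Claim_equal_strip_conversation_suffix_py := by
  intro title _
  unfold Spec_strip_conversation_suffix_py strip_conversation_suffix_py strip_conversation_suffix_py_alt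
  exact pv_key (PySem.Str.strip title)
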